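-- pv_equiv track=rewrite | github.com/showell/elm-py | tools/parse.py | indentLevel
-- ===== SOURCE A (Python) =====
-- def indentLevel(s, i):
--     if i >= len(s) or s[i] == '\n':
--         return 0
--
--     while i >= 0 and s[i] != '\n':
--         i -= 1
--
--     i += 1
--
--     n = 0
--     while i < len(s) and s[i] != '\n' and s[i].isspace():
--         i += 1
--         n += 1
--
--     return n
-- ===== SOURCE B (Python) =====
-- def indentLevel(s, i):
--     if i >= len(s) or s[i] == '\n':
--         return 0
--     t = max(i, 0)
--     indent = 0
--     leading = True
--     for j, c in enumerate(s):
--         if c == '\n':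
--             if j >= t:
--                 break
--             indent = 0
--             leading = True
--         elif leading and c.isspace():
--             indent += 1
--         else:
--             leading = False
--     return indent
-- ===== Notes on version B (the rewrite author's own statement) =====
-- stated objective: alternative
-- what changed: replaces A's backward scan to the line start plus forward whitespace count by a single left-to-right state-machine pass over the string that resets an (indent, leading) accumulator at each newline and stops at the first newline at or past the target position
-- outside the precondition, e.g. on indentLevel('ab ', -2): A returns 1, B returns 0; on indentLevel('a', -5): A raises IndexError, B raises IndexError; on indentLevel('', -1): A raises IndexError, B raises IndexError
import Mathlib
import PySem

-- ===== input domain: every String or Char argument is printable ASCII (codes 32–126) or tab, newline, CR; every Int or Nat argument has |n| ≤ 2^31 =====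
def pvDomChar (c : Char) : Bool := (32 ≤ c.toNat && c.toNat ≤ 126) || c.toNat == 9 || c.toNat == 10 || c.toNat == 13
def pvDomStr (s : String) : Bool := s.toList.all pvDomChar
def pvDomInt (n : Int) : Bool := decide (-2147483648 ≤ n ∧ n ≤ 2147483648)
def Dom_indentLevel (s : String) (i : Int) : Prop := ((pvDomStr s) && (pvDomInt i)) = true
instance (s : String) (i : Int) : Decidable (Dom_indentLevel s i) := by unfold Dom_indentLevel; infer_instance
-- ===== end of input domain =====

-- B replaces A's backward scan to the line start plus forward whitespace count by a single
-- left-to-right state-machine pass that resets an (indent, leading) accumulator at each newline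
-- and stops at the first newline at or past the target position (alternative decomposition,
-- not claimed faster); Pre_ excludes the unspecified corner i ≤ -2, see the Pre_ comment.


-- ===== PORT A =====
-- while i >= 0 and s[i] != '\n': i -= 1      (fuel makes the loop structural; fuel = i+1 suffices,
-- and when it runs out i is already -1, exactly where the loop stops)
def pyAback (cs : List Char) : Nat → Int → Int
  | 0, i => i
  | fuel + 1, i =>
      if 0 ≤ i ∧ PySem.List.pyGetD cs i ' ' ≠ '\n' then pyAback cs fuel (i - 1) else i

-- while i < len(s) and s[i] != '\n' and s[i].isspace(): i += 1; n += 1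
-- (fuel = len - i suffices; at fuel 0 the index has reached len, where the loop stops)
def pyAfwd (cs : List Char) : Nat → Int → Int → Int
  | 0, _, n => n
  | fuel + 1, i, n =>
      if i < (cs.length : Int) ∧ PySem.List.pyGetD cs i ' ' ≠ '\n' ∧
          PySem.Chars.isspace (PySem.List.pyGetD cs i ' ') = true then
        pyAfwd cs fuel (i + 1) (n + 1)
      else n

def indentLevel (s : String) (i : Int) : Int :=
  let cs := s.toList
  if (cs.length : Int) ≤ i ∨ PySem.List.pyGetD cs i ' ' = '\n' then 0
  else
    let j := pyAback cs (i.toNat + 1) i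
    let p := j + 1
    pyAfwd cs ((cs.length : Int) - p).toNat p 0

-- ===== PORT B =====
-- for j, c in enumerate(s): if c == '\n': (if j >= t: break; indent, leading = 0, True)
--                           elif leading and c.isspace(): indent += 1
--                           else: leading = False
def pyBfor (t : Int) : List Char → Int → Int → Bool → Int
  | [], _, indent, _ => indent
  | c :: rest, j, indent, leading =>
      if c = '\n' then
        if t ≤ j then indent else pyBfor t rest (j + 1) 0 true
      else if leading && PySem.Chars.isspace c then pyBfor t rest (j + 1) (indent + 1) leading
      else pyBfor t rest (j + 1) indent false

def indentLevel_alt (s : String) (i : Int) : Int :=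
  let cs := s.toList
  if (cs.length : Int) ≤ i ∨ PySem.List.pyGetD cs i ' ' = '\n' then 0
  else
    let t := max i 0
    pyBfor t cs 0 0 true

-- ===== PRECONDITION & SPEC =====
-- Pre_ excludes i ≤ -2: for i < -len(s) A raises IndexError at the guard's s[i]; for
-- -len(s) ≤ i ≤ -2 the position's meaning is unspecified and the two values are different
-- defensible readings (A scans with Python's negative-index wraparound across the string end,
-- B reads a negative position as lying on the first line), so that corner is excluded; it also
-- excludes ("", -1), where A's guard s[-1] raises on the empty string; i = -1 on a non-empty
-- string and every i ≥ 0 stay inside and are proved equal.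
def Pre_indentLevel (s : String) (i : Int) : Prop := -1 ≤ i ∧ (s.toList ≠ [] ∨ 0 ≤ i)
instance (s : String) (i : Int) : Decidable (Pre_indentLevel s i) := by
  unfold Pre_indentLevel; infer_instance

def pvWitness_indentLevel : String × Int := ("  x\n y", 5)

def Spec_indentLevel (s : String) (i : Int) (out : Int) : Prop := out = indentLevel_alt s i
instance (s : String) (i : Int) (out : Int) : Decidable (Spec_indentLevel s i out) := by
  unfold Spec_indentLevel; infer_instance

-- ===== CLAIM (what is proved, stated in full; the proofs are below) =====
def Claim_equal_indentLevel : Prop :=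
  ∀ (s : String) (i : Int), Dom_indentLevel s i → Pre_indentLevel s i →
    Spec_indentLevel s i (indentLevel s i)

-- ===== LEMMAS AND PROOFS =====

-- whitespace that counts towards the indent: isspace but not the line terminator
def pvWs (c : Char) : Bool := PySem.Chars.isspace c && !(c == '\n')

-- index (as Int) of the last '\n' strictly below position k, or -1
def pvLastNl (cs : List Char) : Nat → Int
  | 0 => -1
  | k + 1 => if cs.getD k ' ' = '\n' then (k : Int) else pvLastNl cs k

-- the reference value: the whitespace run at a line start (stopping at '\n')
def pvIndent (xs : List Char) : Int := ((xs.takeWhile pvWs).length : Int)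

theorem pvLastNl_bounds (cs : List Char) (k : Nat) :
    -1 ≤ pvLastNl cs k ∧ pvLastNl cs k < k := by
  induction k with
  | zero => simp [pvLastNl]
  | succ k ih =>
    simp only [pvLastNl]
    split_ifs with h
    · constructor <;> omega
    · exact ⟨ih.1, by have := ih.2; omega⟩

theorem back_eq (cs : List Char) (k : Nat) : ∀ fuel : Nat, k ≤ fuel →
    pyAback cs fuel ((k : Int) - 1) = pvLastNl cs k := by
  induction k with
  | zero =>
    intro fuel _
    cases fuel with
    | zero => simp [pyAback, pvLastNl]
    | succ f => simp [pyAback, pvLastNl]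
  | succ k ih =>
    intro fuel hf
    obtain ⟨f, rfl⟩ : ∃ f, fuel = f + 1 := ⟨fuel - 1, by omega⟩
    have hcast : ((k : Int) + 1 - 1) = (k : Int) := by ring
    simp only [pyAback, Nat.cast_succ, hcast, pvLastNl]
    rw [show PySem.List.pyGetD cs (k : Int) ' ' = cs.getD k ' ' from PySem.List.pyGetD_natCast ..]
    by_cases h : cs.getD k ' ' = '\n'
    · simp [List.getD] at h
      simp [List.getD, h]
    · simp [List.getD] at h
      have hc : (0:Int) ≤ (k:Int) ∧ ¬ cs[k]?.getD ' ' = '\n' := ⟨Int.natCast_nonneg k, h⟩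
      simp [List.getD, h, hc, ih f (by omega)]

theorem fwd_eq (cs : List Char) (fuel : Nat) :
    ∀ (p : Nat) (n : Int), cs.length - p ≤ fuel →
      pyAfwd cs fuel (p : Int) n = n + pvIndent (cs.drop p) := by
  induction fuel with
  | zero =>
    intro p n h
    have : cs.drop p = [] := List.drop_eq_nil_of_le (by omega)
    simp [pyAfwd, this, pvIndent]
  | succ f ih =>
    intro p n h
    by_cases hp : p < cs.length
    · have hdrop : cs.drop p = cs[p] :: cs.drop (p + 1) := List.drop_eq_getElem_cons hp
      simp only [pyAfwd]
      rw [show PySem.List.pyGetD cs (p : Int) ' ' = cs.getD p ' ' from PySem.List.pyGetD_natCast ..]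
      have hgd : cs.getD p ' ' = cs[p] := List.getD_eq_getElem cs ' ' hp
      by_cases hw : pvWs cs[p] = true
      · have hnl : ¬ cs[p] = '\n' := by
          intro hc; rw [hc] at hw; simp [pvWs] at hw
        have hsp : PySem.Chars.isspace cs[p] = true := by
          simp [pvWs] at hw; exact hw.1
        have hcond : (p:Int) < (cs.length : Int) ∧ cs.getD p ' ' ≠ '\n' ∧
            PySem.Chars.isspace (cs.getD p ' ') = true := by
          refine ⟨by exact_mod_cast hp, ?_, ?_⟩ <;> rw [hgd] <;> assumption
        rw [if_pos hcond]
        have := ih (p + 1) (n + 1) (by omega)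
        rw [show ((p:Int) + 1) = ((p + 1 : Nat) : Int) by push_cast; ring] at *
        rw [this, hdrop]
        simp only [pvIndent, List.takeWhile_cons_of_pos hw, List.length_cons]
        push_cast
        ring
      · have hcond : ¬ ((p:Int) < (cs.length : Int) ∧ cs.getD p ' ' ≠ '\n' ∧
            PySem.Chars.isspace (cs.getD p ' ') = true) := by
          rw [hgd]
          intro ⟨_, h2, h3⟩
          exact hw (by simp [pvWs, h3]; intro hc; exact h2 hc)
        rw [if_neg hcond, hdrop]
        simp only [pvIndent, List.takeWhile_cons]
        simp [hw]
    · have hnil : cs.drop p = [] := List.drop_eq_nil_of_le (by omega)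
      have hcond : ¬ ((p:Int) < (cs.length : Int) ∧ PySem.List.pyGetD cs (p:Int) ' ' ≠ '\n' ∧
          PySem.Chars.isspace (PySem.List.pyGetD cs (p:Int) ' ') = true) := by
        intro ⟨h1, _, _⟩; omega
      simp only [pyAfwd]
      rw [if_neg hcond, hnil]
      simp [pvIndent]

-- shifting the enumerate counter by one shifts the break threshold by one
theorem bfor_shift (cs : List Char) : ∀ (t j acc : Int) (leading : Bool),
    pyBfor t cs (j + 1) acc leading = pyBfor (t - 1) cs j acc leading := by
  induction cs with
  | nil => intro t j acc leading; rfl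
  | cons c rest ih =>
    intro t j acc leading
    simp only [pyBfor]
    have hiff : (t ≤ j + 1) ↔ (t - 1 ≤ j) := by omega
    by_cases hc : c = '\n'
    · rw [if_pos hc, if_pos hc]
      by_cases hb : t ≤ j + 1
      · rw [if_pos hb, if_pos (hiff.mp hb)]
      · rw [if_neg hb, if_neg (fun h => hb (hiff.mpr h))]
        have := ih t (j + 1) 0 true
        rw [show j + 1 + 1 = (j + 1) + 1 from rfl] at this
        rw [this]
    · rw [if_neg hc, if_neg hc]
      by_cases hl : (leading && PySem.Chars.isspace c) = true
      · rw [if_pos hl, if_pos hl, ih]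
      · rw [if_neg hl, if_neg hl, ih]

-- after the leading whitespace has ended, the pass only waits for the breaking newline
theorem bfor_dead (xs : List Char) : ∀ (t : Int),
    (∀ q : Nat, (q : Int) < t → xs.getD q ' ' ≠ '\n') → ∀ acc : Int,
    pyBfor t xs 0 acc false = acc := by
  induction xs with
  | nil => intro t _ acc; rfl
  | cons c rest ih =>
    intro t h acc
    simp only [pyBfor]
    by_cases hc : c = '\n'
    · rw [if_pos hc]
      have ht : t ≤ 0 := by
        by_contra hlt
        exact h 0 (by omega) (by simpa using hc)
      rw [if_pos (by omega : t ≤ (0:Int))]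
    · rw [if_neg hc]
      simp only [Bool.false_and, Bool.false_eq_true, if_false]
      rw [show (0:Int) + 1 = 0 + 1 from rfl, bfor_shift]
      exact ih (t - 1) (fun q hq => by
        have := h (q + 1) (by push_cast; omega)
        simpa using this) acc

-- within a line whose newline (if any) lies at or past the threshold, the pass
-- accumulates exactly the line's leading-whitespace run
theorem bfor_run (xs : List Char) : ∀ (t : Int),
    (∀ q : Nat, (q : Int) < t → xs.getD q ' ' ≠ '\n') → ∀ acc : Int,
    pyBfor t xs 0 acc true = acc + pvIndent xs := by
  induction xs with
  | nil => intro t _ acc; simp [pyBfor, pvIndent]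
  | cons c rest ih =>
    intro t h acc
    have hrest : ∀ q : Nat, (q : Int) < t - 1 → rest.getD q ' ' ≠ '\n' := fun q hq => by
      have := h (q + 1) (by push_cast; omega)
      simpa using this
    simp only [pyBfor]
    by_cases hc : c = '\n'
    · rw [if_pos hc]
      have ht : t ≤ 0 := by
        by_contra hlt
        exact h 0 (by omega) (by simpa using hc)
      rw [if_pos (by omega : t ≤ (0:Int))]
      have : pvWs c = false := by simp [pvWs, hc]
      simp [pvIndent, List.takeWhile_cons, this]
    · rw [if_neg hc]
      by_cases hs : PySem.Chars.isspace c = true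
      · have hws : pvWs c = true := by simp [pvWs, hs, hc]
        simp only [Bool.true_and, hs, if_true]
        rw [show (0:Int) + 1 = 0 + 1 from rfl, bfor_shift, ih (t - 1) hrest (acc + 1)]
        simp only [pvIndent, List.takeWhile_cons_of_pos hws, List.length_cons]
        push_cast
        ring
      · have hws : pvWs c = false := by simp [pvWs]; intro h'; exact absurd h' hs
        rw [if_neg (by simp [hs] : ¬ ((true && PySem.Chars.isspace c) = true))]
        rw [show (0:Int) + 1 = 0 + 1 from rfl, bfor_shift, bfor_dead rest (t - 1) hrest acc]
        simp [pvIndent, List.takeWhile_cons, hws]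

-- crossing a newline strictly below the threshold resets the state completely
theorem bfor_reset (pre : List Char) : ∀ (rest : List Char) (t acc : Int) (leading : Bool),
    '\n' ∉ pre → ((pre.length : Int)) < t →
    pyBfor t (pre ++ '\n' :: rest) 0 acc leading =
      pyBfor (t - (pre.length : Int) - 1) rest 0 0 true := by
  induction pre with
  | nil =>
    intro rest t acc leading _ ht
    simp only [List.nil_append, pyBfor, if_pos rfl]
    rw [if_neg (by simp at ht; omega : ¬ t ≤ (0:Int))]
    rw [show (0:Int) + 1 = 0 + 1 from rfl, bfor_shift]
    simp
  | cons c pre' ih =>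
    intro rest t acc leading hnin ht
    have hc : c ≠ '\n' := fun h => hnin (by simp [h])
    have hnin' : '\n' ∉ pre' := fun h => hnin (by simp [h])
    have ht' : ((pre'.length : Int)) < t - 1 := by
      simp at ht; push_cast at ht ⊢; omega
    simp only [List.cons_append, pyBfor, if_neg hc]
    have hgoal : ∀ b : Bool, ∀ a : Int, pyBfor t (pre' ++ '\n' :: rest) (0 + 1) a b =
        pyBfor (t - ((c :: pre').length : Int) - 1) rest 0 0 true := by
      intro b a
      rw [bfor_shift, ih rest (t - 1) a b hnin' ht']
      congr 1
      simp only [List.length_cons]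
      push_cast
      omega
    by_cases hl : (leading && PySem.Chars.isspace c) = true
    · rw [if_pos hl]; exact hgoal leading (acc + 1)
    · rw [if_neg hl]; exact hgoal false acc

theorem pvLastNl_neg (cs : List Char) : ∀ m : Nat,
    (∀ q : Nat, q < m → cs.getD q ' ' ≠ '\n') → pvLastNl cs m = -1 := by
  intro m
  induction m with
  | zero => intro _; rfl
  | succ m ih =>
    intro h
    simp only [pvLastNl]
    rw [if_neg (h m (by omega))]
    exact ih (fun q hq => h q (by omega))

-- the last newline below t, seen across the first newline of the string
theorem pvLastNl_split (pre rest : List Char) (hnin : '\n' ∉ pre) :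
    ∀ t : Nat, pre.length < t →
      pvLastNl (pre ++ '\n' :: rest) t =
        ((pre.length : Int) + 1) + pvLastNl rest (t - (pre.length + 1)) := by
  intro t
  induction t with
  | zero => intro h; omega
  | succ m ih =>
    intro h
    set k := pre.length with hk
    have hgetk : (pre ++ '\n' :: rest).getD k ' ' = '\n' := by
      have hklt : k < (pre ++ '\n' :: rest).length := by
        simp only [List.length_append, List.length_cons, hk]; omega
      rw [List.getD_eq_getElem _ ' ' hklt]
      simp [hk, List.getElem_append_right (le_refl pre.length)]
    by_cases hkm : k = m
    · subst hkm
      simp only [pvLastNl]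
      rw [if_pos hgetk]
      have : k + 1 - (k + 1) = 0 := by omega
      rw [this]
      simp [pvLastNl]
    · have hkm' : k < m := by omega
      have hgetm : (pre ++ '\n' :: rest).getD m ' ' = rest.getD (m - k - 1) ' ' := by
        by_cases hm : m < (pre ++ '\n' :: rest).length
        · rw [List.getD_eq_getElem _ ' ' hm]
          have hm' : m - k - 1 < rest.length := by simp at hm; omega
          rw [List.getD_eq_getElem _ ' ' hm']
          rw [List.getElem_append_right (by omega : pre.length ≤ m)]
          have : m - pre.length = (m - k - 1) + 1 := by omega
          simp [this]
        · have hm2 : ¬ (m - k - 1) < rest.length := by simp at hm ⊢; omega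
          rw [List.getD_eq_default _ ' ' (by omega), List.getD_eq_default _ ' ' (by omega)]
      have hsub : m + 1 - (k + 1) = (m - (k + 1)) + 1 := by omega
      simp only [pvLastNl, hsub]
      rw [hgetm]
      have hsub2 : m - k - 1 = m - (k + 1) := by omega
      rw [hsub2]
      by_cases hnl : rest.getD (m - (k + 1)) ' ' = '\n'
      · rw [if_pos hnl, if_pos hnl]
        push_cast
        omega
      · rw [if_neg hnl, if_neg hnl]
        exact ih hkm'

-- the full pass from the start of the string computes the indent of the line containing t
theorem bfor_main : ∀ (n : Nat) (cs : List Char), cs.length ≤ n → ∀ t : Int, 0 ≤ t →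
    pyBfor t cs 0 0 true = pvIndent (cs.drop (pvLastNl cs t.toNat + 1).toNat) := by
  intro n
  induction n with
  | zero =>
    intro cs hlen t ht
    have : cs = [] := List.eq_nil_of_length_eq_zero (by omega)
    subst this
    simp [pyBfor, pvIndent, pvLastNl_neg [] t.toNat (by intro q _; simp [List.getD])]
  | succ n ih =>
    intro cs hlen t ht
    by_cases h : ∀ q : Nat, (q : Int) < t → cs.getD q ' ' ≠ '\n'
    · rw [bfor_run cs t h 0, pvLastNl_neg cs t.toNat (fun q hq => h q (by omega))]
      simp
    · push_neg at h
      obtain ⟨q, hqt, hq⟩ := h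
      have hqlen : q < cs.length := by
        by_contra hge
        rw [List.getD_eq_default _ ' ' (by omega)] at hq
        simp at hq
      have hmem : '\n' ∈ cs := by
        rw [List.getD_eq_getElem _ ' ' hqlen] at hq
        exact hq ▸ List.getElem_mem hqlen
      set k := cs.findIdx (· == '\n') with hkdef
      have hklen : k < cs.length := List.findIdx_lt_length_of_exists ⟨'\n', hmem, by simp⟩
      have hkget : cs[k] = '\n' := by
        have := List.findIdx_getElem (w := hklen)
        simpa using this
      have hkmin : ∀ p : Nat, ∀ hp : p < k, cs[p]'(Nat.lt_trans hp hklen) ≠ '\n' := by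
        intro p hp hc
        have h2 := List.not_of_lt_findIdx (p := (· == '\n')) (xs := cs) (h := hp)
        simp at h2
        exact h2 hc
      have hkq : k ≤ q := by
        by_contra hlt
        push_neg at hlt
        rw [List.getD_eq_getElem _ ' ' hqlen] at hq
        exact hkmin q hlt hq
      have hkt : (k : Int) < t := by omega
      have hdecomp : cs = cs.take k ++ '\n' :: cs.drop (k + 1) := by
        conv_lhs => rw [← List.take_append_drop k cs]
        congr 1
        rw [List.drop_eq_getElem_cons hklen, hkget]
      have hprelen : (cs.take k).length = k := List.length_take_of_le (by omega)
      have hnin : '\n' ∉ cs.take k := by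
        intro hm
        obtain ⟨p, hp, hpe⟩ := List.getElem_of_mem hm
        rw [hprelen] at hp
        rw [List.getElem_take] at hpe
        exact hkmin p hp hpe
      have hrestlen : (cs.drop (k + 1)).length ≤ n := by
        rw [List.length_drop]; omega
      -- left side: reset across the first newline, then recurse
      conv_lhs => rw [hdecomp]
      rw [bfor_reset (cs.take k) (cs.drop (k + 1)) t 0 true hnin (by omega)]
      rw [hprelen]
      have ht' : 0 ≤ t - (k : Int) - 1 := by omega
      rw [ih (cs.drop (k + 1)) hrestlen (t - (k : Int) - 1) ht']
      -- right side: split pvLastNl at the first newline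
      have hsplit := pvLastNl_split (cs.take k) (cs.drop (k + 1)) hnin t.toNat (by omega)
      rw [hprelen] at hsplit
      conv_rhs => rw [hdecomp]
      rw [hsplit]
      have htn : t.toNat - (k + 1) = (t - (k : Int) - 1).toNat := by omega
      rw [htn]
      set r := pvLastNl (cs.drop (k + 1)) (t - (k : Int) - 1).toNat with hr
      have hrb := pvLastNl_bounds (cs.drop (k + 1)) (t - (k : Int) - 1).toNat
      rw [← hr] at hrb
      have hcast : ((k : Int) + 1 + r + 1).toNat = (r + 1).toNat + (k + 1) := by omega
      rw [hcast]
      conv_rhs => rw [← hdecomp]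
      rw [List.drop_drop, Nat.add_comm (k + 1) ((r + 1).toNat)]

-- A's value, characterised as the indent of the line containing position max i 0
theorem a_eq (cs : List Char) (i : Int) (hPre : -1 ≤ i)
    (hile : ¬ (cs.length : Int) ≤ i) (hinl : ¬ PySem.List.pyGetD cs i ' ' = '\n') :
    pyAfwd cs ((cs.length : Int) - (pyAback cs (i.toNat + 1) i + 1)).toNat
        (pyAback cs (i.toNat + 1) i + 1) 0 =
      pvIndent (cs.drop (pvLastNl cs (max i 0).toNat + 1).toNat) := by
  have hilt : i < (cs.length : Int) := by omega
  by_cases hi0 : 0 ≤ i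
  · have hmax : max i 0 = i := by omega
    have hklt : i.toNat < cs.length := by omega
    have hgd : cs.getD i.toNat ' ' ≠ '\n' := by
      rw [List.getD_eq_getElem cs ' ' hklt]
      rw [PySem.List.pyGetD_eq_getElem cs ' ' hi0 hilt] at hinl
      exact hinl
    have hnl2 : pvLastNl cs (i.toNat + 1) = pvLastNl cs i.toNat := by
      simp only [pvLastNl]
      rw [if_neg hgd]
    have hback : pyAback cs (i.toNat + 1) i = pvLastNl cs i.toNat := by
      have h1 := back_eq cs (i.toNat + 1) (i.toNat + 1) le_rfl
      rw [show ((i.toNat + 1 : Nat) : Int) - 1 = i by omega, hnl2] at h1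
      exact h1
    rw [hback, hmax]
    have hb := pvLastNl_bounds cs i.toNat
    set j := pvLastNl cs i.toNat with hj
    have hp1 : j + 1 = (((j + 1).toNat : Nat) : Int) := by omega
    rw [hp1]
    rw [fwd_eq cs ((cs.length : Int) - ((((j + 1).toNat : Nat)) : Int)).toNat (j + 1).toNat 0
      (by omega)]
    simp
    rw [show max (j + 1) 0 = j + 1 by omega]
  · have hi1 : i = -1 := by omega
    subst hi1
    have hA : pyAback cs ((-1 : Int).toNat + 1) (-1) = -1 := rfl
    rw [hA]
    rw [show max (-1 : Int) 0 = 0 by omega]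
    have hpv0 : pvLastNl cs (0 : Int).toNat = -1 := rfl
    rw [hpv0]
    norm_num
    have h := fwd_eq cs cs.length 0 0 (by omega)
    simpa using h

theorem main_eq (s : String) (i : Int) (hPre : -1 ≤ i) :
    indentLevel s i = indentLevel_alt s i := by
  set cs := s.toList with hcs
  by_cases hg : (cs.length : Int) ≤ i ∨ PySem.List.pyGetD cs i ' ' = '\n'
  · simp only [indentLevel, indentLevel_alt, ← hcs, if_pos hg]
  · rw [not_or] at hg
    obtain ⟨hile, hinl⟩ := hg
    simp only [indentLevel, indentLevel_alt, ← hcs, if_neg (by rw [not_or]; exact ⟨hile, hinl⟩)]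
    rw [a_eq cs i hPre hile hinl,
        bfor_main cs.length cs le_rfl (max i 0) (by omega)]

-- ===== VERDICT (by name: the statement is the Claim_ definition above) =====
theorem indentLevel_spec : Claim_equal_indentLevel := by
  intro s i _ hPre
  unfold Spec_indentLevel
  exact (main_eq s i hPre.1).symm ▸ rfl
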